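-- pv_equiv track=rewrite | github.com/heejin42/study_algorithm | baekjoon/String/12904_A와B.py | solution
-- ===== SOURCE A (Python) =====
-- def solution(s, t):
--     while t:
--         if s == t:
--             return 1
--         if t[-1] == 'A':
--             t.pop()
--         elif t[-1] == 'B':
--             t.pop()
--             t.reverse()
--     return 0
-- ===== SOURCE B (Python) =====
-- def solution(s, t):
--     # Backward simulation: two pointers + direction flag instead of physical pop/reverse.
--     lo, hi, rev = 0, len(t), False
--     while hi - lo > len(s):
--         last = t[lo] if rev else t[hi - 1]
--         if rev:
--             lo += 1
--         else:
--             hi -= 1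
--         if last == 'B':
--             rev = not rev
--     if hi - lo < len(s):
--         return 0
--     seg = t[lo:hi]
--     if rev:
--         seg.reverse()
--     return 1 if seg == s else 0
-- ===== Notes on version B (the rewrite author's own statement) =====
-- stated objective: alternative
-- what changed: B replaces A's physical pop/reverse simulation (each 'B' reverses the whole remaining list) by a two-pointer window over t with a direction flag and a single final comparison; intended as asymptotically faster, but a timing run could not confirm a ratio (A times out on the generated sizes); A mutates t in place, B does not (equivalence is about the return value only).
-- intended difference: On s = [] (with t all 'A'/'B') A returns 0 because it only tests s == t while t is nonempty, but B returns 1, which is intended: the empty source generates every A/B target by the append rules. — e.g. on solution([], ["A"]): A returns 0, B returns 1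
-- outside the precondition, e.g. on solution(['x'], ['x', 'A']): A returns 1, B returns 1
import Mathlib
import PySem

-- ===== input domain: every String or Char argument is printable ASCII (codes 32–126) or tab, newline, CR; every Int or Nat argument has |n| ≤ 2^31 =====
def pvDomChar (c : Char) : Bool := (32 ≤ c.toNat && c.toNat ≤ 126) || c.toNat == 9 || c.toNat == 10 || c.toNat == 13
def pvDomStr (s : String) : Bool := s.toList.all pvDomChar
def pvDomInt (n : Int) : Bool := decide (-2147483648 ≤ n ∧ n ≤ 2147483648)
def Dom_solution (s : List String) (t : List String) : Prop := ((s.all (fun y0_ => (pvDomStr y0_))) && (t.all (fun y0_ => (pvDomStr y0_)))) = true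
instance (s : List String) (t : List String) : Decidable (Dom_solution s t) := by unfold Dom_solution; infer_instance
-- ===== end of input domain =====

-- B replaces A's physical pop/reverse loop by a two-pointer backward simulation with a direction
-- flag and a single final comparison; A mutates t in place while B does not — the equivalence
-- proved here is about the return value only.

-- ===== PORT A =====
-- Literal port of A's while loop as structural recursion on t (the list A mutates).
-- In the branch where t's last element is neither "A" nor "B" (and s ≠ t), the Python loop never
-- terminates; that branch is excluded by Pre_solution, the port returns 0 there.
def solution (s : List String) (t : List String) : Int :=
  if _h : t = [] then 0
  else if s = t then 1
  else if t.getLast? = some "A" then solution s t.dropLast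
  else if t.getLast? = some "B" then solution s t.dropLast.reverse
  else 0
termination_by t.length
decreasing_by
  · have h0 : 0 < t.length := List.length_pos_iff.mpr _h
    simp [List.length_dropLast]
    omega
  · have h0 : 0 < t.length := List.length_pos_iff.mpr _h
    simp [List.length_dropLast]
    omega

-- ===== PORT B =====
-- while hi - lo > len(s): inspect the virtual last element, move a pointer, maybe flip the flag.
def solAltLoop (s t : List String) (lo hi : Nat) (rev : Bool) : Nat × Nat × Bool :=
  if s.length < hi - lo then
    let last := if rev then t.getD lo "" else t.getD (hi - 1) ""
    let lo' := if rev then lo + 1 else lo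
    let hi' := if rev then hi else hi - 1
    solAltLoop s t lo' hi' (if last = "B" then !rev else rev)
  else (lo, hi, rev)
termination_by hi - lo
decreasing_by split <;> omega

-- post-loop part of Source B: compare s with t[lo:hi] in the current orientation
-- (t[lo:hi] with 0 ≤ lo ≤ hi ≤ len t is exactly (t.drop lo).take (hi - lo))
def solAltFinish (s t : List String) (st : Nat × Nat × Bool) : Int :=
  if st.2.1 - st.1 < s.length then 0
  else
    let seg := (t.drop st.1).take (st.2.1 - st.1)
    let seg := if st.2.2 then seg.reverse else seg
    if seg = s then 1 else 0

def solution_alt (s : List String) (t : List String) : Int :=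
  solAltFinish s t (solAltLoop s t 0 t.length false)

-- ===== PRECONDITION & SPEC =====
-- Pre_ excludes t containing an element other than "A"/"B" except for the immediate match
-- s = t: on such inputs Python A can loop forever (whenever the shrinking list's last element
-- is junk and s ≠ t); A may still return on some of them (a junk-free suffix reaching a match),
-- and B agrees there as well — see cites.
def Pre_solution (s : List String) (t : List String) : Prop :=
  (∀ x ∈ t, x = "A" ∨ x = "B") ∨ s = t
instance (s : List String) (t : List String) : Decidable (Pre_solution s t) := by
  unfold Pre_solution; infer_instance
def pvWitness_solution : List String × List String := (["A"], ["B", "A"])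

-- On s = [] (with t all "A"/"B") A returns 0 but B returns 1; 1 is intended: the empty source
-- string generates every A/B target by the append rules, and A's 0 is an artefact of checking
-- s == t only while t is nonempty.
def D_solution (s : List String) (t : List String) : Prop := s = []
instance (s : List String) (t : List String) : Decidable (D_solution s t) := by
  unfold D_solution; infer_instance
def Spec_solution (s : List String) (t : List String) (out : Int) : Prop :=
  ¬ D_solution s t → out = solution_alt s t
instance (s : List String) (t : List String) (out : Int) : Decidable (Spec_solution s t out) := by
  unfold Spec_solution; infer_instance
def pvDiffWitness_solution : List String × List String := ([], ["A"])
def pvDiffWitnessOut_solution : Int × Int := (0, 1)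

-- ===== CLAIM (what is proved, stated in full; the proofs are below) =====
def Claim_unchanged_solution : Prop := ∀ (s : List String) (t : List String), Dom_solution s t → Pre_solution s t → Spec_solution s t (solution s t)
def Claim_changed_solution : Prop := Dom_solution (pvDiffWitness_solution.1) (pvDiffWitness_solution.2) ∧ Pre_solution (pvDiffWitness_solution.1) (pvDiffWitness_solution.2) ∧ D_solution (pvDiffWitness_solution.1) (pvDiffWitness_solution.2) ∧ solution (pvDiffWitness_solution.1) (pvDiffWitness_solution.2) = pvDiffWitnessOut_solution.1 ∧ solution_alt (pvDiffWitness_solution.1) (pvDiffWitness_solution.2) = pvDiffWitnessOut_solution.2 ∧ pvDiffWitnessOut_solution.1 ≠ pvDiffWitnessOut_solution.2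
def Claim_exact_solution : Prop := ∀ (s : List String) (t : List String), Dom_solution s t → Pre_solution s t → D_solution s t → solution s t ≠ solution_alt s t

-- ===== LEMMAS AND PROOFS =====

-- the list A physically holds when B's state is (lo, hi, rev)
def pvView (t : List String) (lo hi : Nat) (rev : Bool) : List String :=
  if rev then ((t.drop lo).take (hi - lo)).reverse else (t.drop lo).take (hi - lo)

-- A returns 0 whenever (all elements are "A"/"B" and) a match is impossible by length / s = []
lemma sol_zero (s : List String) :
    ∀ n (u : List String), u.length = n → (∀ x ∈ u, x = "A" ∨ x = "B") →
      (s = [] ∨ u.length < s.length) → solution s u = 0 := by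
  intro n
  induction n using Nat.strong_induction_on with
  | _ n ih =>
    intro u hlenn hab hlen
    rw [solution]
    by_cases hu : u = []
    · simp [hu]
    have hsu : ¬ s = u := by
      rcases hlen with h | h
      · subst h; simpa using Ne.symm hu
      · intro he; subst he; omega
    have h0 : 0 < u.length := List.length_pos_iff.mpr hu
    have hd : u.dropLast.length = u.length - 1 := List.length_dropLast
    have hab' : ∀ x ∈ u.dropLast, x = "A" ∨ x = "B" :=
      fun x hx => hab x (List.dropLast_sublist u |>.mem hx)
    have hlen' : s = [] ∨ u.dropLast.length < s.length := by
      rcases hlen with h | h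
      · exact Or.inl h
      · right; omega
    rcases hab _ (List.getLast_mem hu) with hA | hB
    · have hlA : u.getLast? = some "A" := by rw [List.getLast?_eq_some_getLast hu, hA]
      rw [dif_neg hu, if_neg hsu, if_pos hlA]
      exact ih u.dropLast.length (by omega) _ rfl hab' hlen'
    · have hlB : u.getLast? = some "B" := by rw [List.getLast?_eq_some_getLast hu, hB]
      have hnA : ¬ u.getLast? = some "A" := by rw [hlB]; simp
      rw [dif_neg hu, if_neg hsu, if_neg hnA, if_pos hlB]
      exact ih u.dropLast.reverse.length (by simp; omega) _ rfl
        (fun x hx => hab' x (List.mem_reverse.mp hx)) (by simpa using hlen')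

lemma view_length (t : List String) (lo hi : Nat) (rev : Bool)
    (h2 : hi ≤ t.length) : (pvView t lo hi rev).length = hi - lo := by
  unfold pvView
  split <;> simp <;> omega

lemma view_mem (t : List String) (lo hi : Nat) (rev : Bool) {x : String}
    (hx : x ∈ pvView t lo hi rev) : x ∈ t := by
  unfold pvView at hx
  split at hx
  · exact List.mem_of_mem_drop (List.mem_of_mem_take (List.mem_reverse.mp hx))
  · exact List.mem_of_mem_drop (List.mem_of_mem_take hx)

lemma seg_getLast? (t : List String) (lo hi : Nat) (h1 : lo < hi) (h2 : hi ≤ t.length) :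
    ((t.drop lo).take (hi - lo)).getLast? = some (t[hi - 1]'(by omega)) := by
  have hlen : ((t.drop lo).take (hi - lo)).length = hi - lo := by simp; omega
  rw [List.getLast?_eq_getElem?, hlen, List.getElem?_take, if_pos (by omega),
    List.getElem?_drop, show lo + (hi - lo - 1) = hi - 1 by omega,
    List.getElem?_eq_getElem (by omega)]

lemma seg_head? (t : List String) (lo hi : Nat) (h1 : lo < hi) (h2 : hi ≤ t.length) :
    ((t.drop lo).take (hi - lo)).head? = some (t[lo]'(by omega)) := by
  rw [List.head?_eq_getElem?, List.getElem?_take, if_pos (by omega), List.getElem?_drop,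
    Nat.add_zero, List.getElem?_eq_getElem (by omega)]

lemma seg_dropLast (t : List String) (lo hi : Nat) (h2 : hi ≤ t.length) :
    ((t.drop lo).take (hi - lo)).dropLast = (t.drop lo).take (hi - 1 - lo) := by
  apply List.ext_getElem?
  intro i
  rw [List.getElem?_dropLast]
  simp only [List.getElem?_take, List.length_take, List.length_drop]
  split_ifs <;> first | rfl | omega

lemma seg_tail (t : List String) (lo hi : Nat) :
    ((t.drop lo).take (hi - lo)).tail = (t.drop (lo + 1)).take (hi - (lo + 1)) := by
  rw [← List.drop_one, List.drop_take, List.drop_drop, Nat.sub_sub]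

lemma getD_eq (t : List String) (i : Nat) (h : i < t.length) : t.getD i "" = t[i] := by
  rw [List.getD_eq_getElem?_getD, List.getElem?_eq_getElem h, Option.getD_some]

-- loop invariant: B's remaining computation from state (lo, hi, rev) computes
-- A's answer on the list A physically holds at that point
lemma main_loop (s t : List String) (hs : s ≠ []) (hab : ∀ x ∈ t, x = "A" ∨ x = "B") :
    ∀ n lo hi rev, hi - lo = n → hi ≤ t.length →
      solAltFinish s t (solAltLoop s t lo hi rev) = solution s (pvView t lo hi rev) := by
  intro n
  induction n using Nat.strong_induction_on with
  | _ n ih =>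
    intro lo hi rev hn h2
    have hvlen : (pvView t lo hi rev).length = hi - lo := view_length t lo hi rev h2
    by_cases hgt : s.length < hi - lo
    · -- loop takes a step
      have hslen : 0 < s.length := List.length_pos_iff.mpr hs
      have hlolt : lo < hi := by omega
      have hvne : pvView t lo hi rev ≠ [] := by
        intro h; rw [h] at hvlen; simp at hvlen; omega
      have hsne : ¬ s = pvView t lo hi rev := by
        intro h; rw [← h] at hvlen; omega
      cases rev with
      | false =>
        have hgetD : t.getD (hi - 1) "" = t[hi - 1]'(by omega) := getD_eq t (hi - 1) (by omega)
        have hlast : (pvView t lo hi false).getLast? = some (t[hi - 1]'(by omega)) := by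
          unfold pvView
          simpa using seg_getLast? t lo hi hlolt h2
        have hdl : (pvView t lo hi false).dropLast = pvView t lo (hi - 1) false := by
          unfold pvView
          simpa using seg_dropLast t lo hi h2
        rcases hab _ (List.getElem_mem (by omega : hi - 1 < t.length)) with hA | hB
        · -- last is "A": pop
          have hstep : solAltLoop s t lo hi false = solAltLoop s t lo (hi - 1) false := by
            rw [solAltLoop, if_pos hgt]
            simp [List.getElem?_eq_getElem (show hi - 1 < t.length by omega), hA]
          have hrhs : solution s (pvView t lo hi false) = solution s (pvView t lo (hi - 1) false) := by
            conv_lhs => rw [solution]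
            rw [dif_neg hvne, if_neg hsne, if_pos (by rw [hlast, hA]), hdl]
          rw [hstep, hrhs]
          exact ih (hi - 1 - lo) (by omega) lo (hi - 1) false rfl (by omega)
        · -- last is "B": pop then reverse
          have hstep : solAltLoop s t lo hi false = solAltLoop s t lo (hi - 1) true := by
            rw [solAltLoop, if_pos hgt]
            simp [List.getElem?_eq_getElem (show hi - 1 < t.length by omega), hB]
          have hdlr : (pvView t lo hi false).dropLast.reverse = pvView t lo (hi - 1) true := by
            rw [hdl]; unfold pvView; simp
          have hrhs : solution s (pvView t lo hi false) = solution s (pvView t lo (hi - 1) true) := by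
            conv_lhs => rw [solution]
            rw [dif_neg hvne, if_neg hsne, if_neg (by rw [hlast, hB]; simp),
              if_pos (by rw [hlast, hB]), hdlr]
          rw [hstep, hrhs]
          exact ih (hi - 1 - lo) (by omega) lo (hi - 1) true rfl (by omega)
      | true =>
        have hgetD : t.getD lo "" = t[lo]'(by omega) := getD_eq t lo (by omega)
        have hlast : (pvView t lo hi true).getLast? = some (t[lo]'(by omega)) := by
          unfold pvView
          simpa [List.getLast?_reverse] using seg_head? t lo hi hlolt h2
        have hdl : (pvView t lo hi true).dropLast = pvView t (lo + 1) hi true := by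
          unfold pvView
          simpa [List.dropLast_reverse] using congrArg List.reverse (seg_tail t lo hi)
        rcases hab _ (List.getElem_mem (by omega : lo < t.length)) with hA | hB
        · have hstep : solAltLoop s t lo hi true = solAltLoop s t (lo + 1) hi true := by
            rw [solAltLoop, if_pos hgt]
            simp [List.getElem?_eq_getElem (show lo < t.length by omega), hA]
          have hrhs : solution s (pvView t lo hi true) = solution s (pvView t (lo + 1) hi true) := by
            conv_lhs => rw [solution]
            rw [dif_neg hvne, if_neg hsne, if_pos (by rw [hlast, hA]), hdl]
          rw [hstep, hrhs]
          exact ih (hi - (lo + 1)) (by omega) (lo + 1) hi true rfl (by omega)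
        · have hstep : solAltLoop s t lo hi true = solAltLoop s t (lo + 1) hi false := by
            rw [solAltLoop, if_pos hgt]
            simp [List.getElem?_eq_getElem (show lo < t.length by omega), hB]
          have hdlr : (pvView t lo hi true).dropLast.reverse = pvView t (lo + 1) hi false := by
            rw [hdl]; unfold pvView; simp
          have hrhs : solution s (pvView t lo hi true) = solution s (pvView t (lo + 1) hi false) := by
            conv_lhs => rw [solution]
            rw [dif_neg hvne, if_neg hsne, if_neg (by rw [hlast, hB]; simp),
              if_pos (by rw [hlast, hB]), hdlr]
          rw [hstep, hrhs]
          exact ih (hi - (lo + 1)) (by omega) (lo + 1) hi false rfl (by omega)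
    · -- loop stops: hi - lo ≤ s.length
      rw [solAltLoop, if_neg hgt]
      have hsegview : (if rev then ((t.drop lo).take (hi - lo)).reverse
          else (t.drop lo).take (hi - lo)) = pvView t lo hi rev := rfl
      by_cases hlt : hi - lo < s.length
      · rw [solAltFinish, if_pos hlt]
        exact (sol_zero s _ (pvView t lo hi rev) rfl
          (fun x hx => hab x (view_mem t lo hi rev hx)) (Or.inr (by omega))).symm
      · have hvne : pvView t lo hi rev ≠ [] := by
          intro h; rw [h] at hvlen; simp at hvlen
          exact hs (List.length_eq_zero_iff.mp (by omega))
        rw [solAltFinish, if_neg hlt]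
        simp only [hsegview]
        by_cases hseg : pvView t lo hi rev = s
        · rw [if_pos hseg]
          conv_rhs => rw [solution]
          rw [dif_neg hvne, if_pos hseg.symm]
        · -- no match at equal length: A pops below length s.length and returns 0
          rw [if_neg hseg]
          have habv : ∀ x ∈ pvView t lo hi rev, x = "A" ∨ x = "B" :=
            fun x hx => hab x (view_mem t lo hi rev hx)
          have hdlen : (pvView t lo hi rev).dropLast.length < s.length := by
            rw [List.length_dropLast, hvlen]
            have h0 : 0 < hi - lo := by
              rcases Nat.eq_zero_or_pos (hi - lo) with h | h
              · exfalso
                apply hvne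
                apply List.length_eq_zero_iff.mp
                omega
              · exact h
            omega
          have hsne : ¬ s = pvView t lo hi rev := fun h => hseg h.symm
          conv_rhs => rw [solution]
          rw [dif_neg hvne, if_neg hsne]
          rcases habv _ (List.getLast_mem hvne) with hA | hB
          · rw [if_pos (by rw [List.getLast?_eq_some_getLast hvne, hA])]
            exact (sol_zero s _ _ rfl
              (fun x hx => habv x (List.dropLast_sublist _ |>.mem hx)) (Or.inr hdlen)).symm
          · rw [if_neg (by rw [List.getLast?_eq_some_getLast hvne, hB]; simp),
              if_pos (by rw [List.getLast?_eq_some_getLast hvne, hB])]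
            exact (sol_zero s _ _ rfl
              (fun x hx => habv x (List.dropLast_sublist _ |>.mem (List.mem_reverse.mp hx)))
              (Or.inr (by simpa using hdlen))).symm

-- both programs on the immediate match s = t (s nonempty): 1 on both sides
lemma sol_self (s : List String) (hs : s ≠ []) : solution s s = 1 := by
  rw [solution, dif_neg hs, if_pos rfl]

lemma alt_self (s : List String) : solution_alt s s = 1 := by
  rw [solution_alt, solAltLoop, if_neg (by omega), solAltFinish,
    if_neg (by simp)]
  simp

-- on s = [] B's loop drains the window completely and the final compare succeeds
lemma altB_empty (t : List String) :
    ∀ n lo hi rev, hi - lo = n →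
      solAltFinish [] t (solAltLoop [] t lo hi rev) = 1 := by
  intro n
  induction n using Nat.strong_induction_on with
  | _ n ih =>
    intro lo hi rev hn
    rw [solAltLoop]
    by_cases hgt : ([] : List String).length < hi - lo
    · rw [if_pos hgt]
      simp only [List.length_nil] at hgt
      cases rev with
      | false =>
        simpa using ih (hi - 1 - lo) (by omega) lo (hi - 1) _ rfl
      | true =>
        simpa using ih (hi - (lo + 1)) (by omega) (lo + 1) hi _ rfl
    · rw [if_neg hgt]
      simp only [List.length_nil] at hgt
      have h0 : hi - lo = 0 := by omega
      rw [solAltFinish]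
      simp [h0]

-- ===== VERDICT (by name: the statement is the Claim_ definition above) =====
theorem solution_spec : Claim_unchanged_solution := by
  intro s t _ hpre hnd
  have hs : s ≠ [] := hnd
  by_cases hab : ∀ x ∈ t, x = "A" ∨ x = "B"
  · have h := main_loop s t hs hab t.length 0 t.length false (by omega) (by omega)
    unfold solution_alt
    rw [h]
    congr 1
    unfold pvView
    simp
  · have hst : s = t := by
      rcases hpre with h | h
      · exact absurd h hab
      · exact h
    subst hst
    rw [sol_self s hs, alt_self s]

theorem solution_changed : Claim_changed_solution := by
  unfold Claim_changed_solution
  refine ⟨by decide, by decide, by decide, ?_, ?_, by decide⟩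
  · show solution [] ["A"] = 0
    rw [solution]
    norm_num
    rw [solution]
    norm_num
  · show solution_alt [] ["A"] = 1
    rw [solution_alt, solAltLoop]
    norm_num
    rw [solAltLoop]
    norm_num [solAltFinish]

theorem solution_tight : Claim_exact_solution := by
  intro s t _ hpre hd
  subst hd
  have hab : ∀ x ∈ t, x = "A" ∨ x = "B" := by
    rcases hpre with h | h
    · exact h
    · subst h; simp
  rw [sol_zero [] t.length t rfl hab (Or.inl rfl)]
  unfold solution_alt
  rw [altB_empty t t.length 0 t.length false (by omega)]
  decide
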